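-- pv_equiv track=rewrite | github.com/young55775/Genetorch-developing | CELE_genome.py | atcg
-- ===== SOURCE A (Python) =====
-- def atcg(seq):
--     per = {'A/T': 0, 'C/G': 0}
--     for i in seq:
--         if i == 'A' or i == 'T':
--             per['A/T'] += 1
--         else:
--             per['C/G'] += 1
--     return per
-- ===== SOURCE B (Python) =====
-- def atcg(seq):
--     at = seq.count('A') + seq.count('T')
--     return {'A/T': at, 'C/G': len(seq) - at}
-- ===== Notes on version B (the rewrite author's own statement) =====
-- stated objective: faster
-- what changed: B has no explicit loop or parallel counters: it takes two staged library value-counts for the A/T bucket and derives the C/G bucket by subtraction from the sequence length, instead of A's element-by-element loop incrementing a dict of two counters.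
import Mathlib
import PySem

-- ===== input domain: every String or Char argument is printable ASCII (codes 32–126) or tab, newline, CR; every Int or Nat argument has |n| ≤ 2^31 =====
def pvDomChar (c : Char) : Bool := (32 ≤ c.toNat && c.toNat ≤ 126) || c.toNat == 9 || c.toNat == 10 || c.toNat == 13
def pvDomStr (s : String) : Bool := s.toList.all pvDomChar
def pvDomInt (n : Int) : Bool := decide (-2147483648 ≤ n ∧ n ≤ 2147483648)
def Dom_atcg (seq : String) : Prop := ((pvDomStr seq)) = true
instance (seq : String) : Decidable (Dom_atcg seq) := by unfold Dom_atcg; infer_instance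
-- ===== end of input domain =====

-- B drops A's loop with a dict of two parallel counters: it takes the library count of 'A' and of 'T' and derives the C/G bucket as len(seq) - at (measured faster: C-level scans vs a Python-level loop).

-- ===== PORT A =====
def atcg (seq : String) : List (String × Int) :=
  let per : PySem.Dict String Int := PySem.Dict.ofList [("A/T", 0), ("C/G", 0)]
  let per := seq.toList.foldl (fun per i =>
    if i == 'A' || i == 'T' then per.modify "A/T" 0 (· + 1)
    else per.modify "C/G" 0 (· + 1)) per
  per.items

-- ===== PORT B =====
def atcg_alt (seq : String) : List (String × Int) :=
  let at_ : Int := (PySem.Str.count seq "A" : Int) + (PySem.Str.count seq "T" : Int)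
  [("A/T", at_), ("C/G", PySem.Str.len seq - at_)]

-- ===== PRECONDITION & SPEC =====
def Spec_atcg (seq : String) (out : List (String × Int)) : Prop := out = atcg_alt seq
instance (seq : String) (out : List (String × Int)) : Decidable (Spec_atcg seq out) := by unfold Spec_atcg; infer_instance

-- ===== CLAIM (what is proved, stated in full; the proofs are below) =====
def Claim_equal_atcg : Prop := ∀ (seq : String), Dom_atcg seq → Spec_atcg seq (atcg seq)

-- ===== LEMMAS AND PROOFS =====

theorem modify_at (a c : Int) :
    PySem.Dict.modify (PySem.Dict.mk [("A/T", a), ("C/G", c)]) "A/T" 0 (· + 1) =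
      PySem.Dict.mk [("A/T", a + 1), ("C/G", c)] := by
  simp [PySem.Dict.modify, PySem.Dict.getD, PySem.Dict.get?, PySem.Dict.insert,
    PySem.Dict.contains, PySem.Dict.items]

theorem modify_cg (a c : Int) :
    PySem.Dict.modify (PySem.Dict.mk [("A/T", a), ("C/G", c)]) "C/G" 0 (· + 1) =
      PySem.Dict.mk [("A/T", a), ("C/G", c + 1)] := by
  simp [PySem.Dict.modify, PySem.Dict.getD, PySem.Dict.get?, PySem.Dict.insert,
    PySem.Dict.contains, PySem.Dict.items]

-- the loop of A, on a literal two-key dict, counts A/T into the first slot and the rest into the second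
theorem atcg_loop (l : List Char) (a c : Int) :
    l.foldl (fun per i =>
      if i == 'A' || i == 'T' then PySem.Dict.modify per "A/T" 0 (· + 1)
      else PySem.Dict.modify per "C/G" 0 (· + 1))
      (PySem.Dict.mk [("A/T", a), ("C/G", c)]) =
    PySem.Dict.mk [("A/T", a + ((l.countP (fun x => x == 'A' || x == 'T')) : Int)),
                   ("C/G", c + ((l.countP (fun x => !(x == 'A' || x == 'T'))) : Int))] := by
  induction l generalizing a c with
  | nil => simp
  | cons x xs ih =>
    simp only [List.foldl_cons, List.countP_cons]
    by_cases h : (x == 'A' || x == 'T') = true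
    · rw [if_pos h, modify_at, ih]
      simp only [h, Bool.not_true, if_true, PySem.Dict.mk.injEq, List.cons.injEq,
        Prod.mk.injEq, true_and, and_true, if_neg (by simp : ¬(false = true))]
      constructor <;> push_cast <;> ring
    · rw [if_neg h, modify_cg, ih]
      simp only [Bool.not_eq_true] at h
      simp only [h, Bool.not_false, if_true, PySem.Dict.mk.injEq, List.cons.injEq,
        Prod.mk.injEq, true_and, and_true, if_neg (by simp : ¬(false = true))]
      constructor <;> push_cast <;> ring

-- Chars.count.go with a single-character needle is List.count (enough fuel)
theorem count_go_singleton (c : Char) (l : List Char) (fuel acc : Nat)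
    (h : l.length ≤ fuel) :
    PySem.Chars.count.go [c] fuel l acc = acc + l.count c := by
  induction l generalizing fuel acc with
  | nil => cases fuel <;> simp [PySem.Chars.count.go]
  | cons x xs ih =>
    cases fuel with
    | zero => simp at h
    | succ n =>
      simp only [List.length_cons, Nat.succ_le_succ_iff] at h
      by_cases hx : x = c
      · subst hx
        have hpre : ([x].isPrefixOf (x :: xs)) = true := by simp [List.isPrefixOf]
        simp only [PySem.Chars.count.go, hpre, if_true]
        simp only [List.length_singleton, List.drop_succ_cons, List.drop_zero]
        rw [ih n (acc + 1) h]
        simp [List.count_cons]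
        omega
      · have hpre : ([c].isPrefixOf (x :: xs)) = false := by
          simp only [List.isPrefixOf, List.isPrefixOf_nil_left, Bool.and_true, beq_eq_false_iff_ne]
          exact fun hh => absurd hh.symm hx
        simp only [PySem.Chars.count.go, hpre]
        rw [if_neg (by simp [hpre]), ih n acc h]
        simp [List.count_cons, hx]

theorem count_singleton (c : Char) (l : List Char) :
    PySem.Chars.count l [c] = l.count c := by
  have := count_go_singleton c l l.length 0 le_rfl
  simpa [PySem.Chars.count] using this

theorem countP_or (l : List Char) :
    l.countP (fun x => x == 'A' || x == 'T') = l.count 'A' + l.count 'T' := by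
  induction l with
  | nil => rfl
  | cons x xs ih =>
    by_cases hA : x = 'A'
    · subst hA; simp [List.countP_cons, List.count_cons, ih]; omega
    · by_cases hT : x = 'T'
      · subst hT; simp [List.countP_cons, List.count_cons, ih]; omega
      · simp [List.countP_cons, List.count_cons, hA, hT, ih]

theorem countP_not_add (l : List Char) (p : Char → Bool) :
    l.countP p + l.countP (fun x => !p x) = l.length := by
  simpa using List.length_eq_countP_add_countP (l := l) (p := p) |>.symm

-- ===== VERDICT (by name: the statement is the Claim_ definition above) =====
theorem atcg_spec : Claim_equal_atcg := by
  intro seq _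
  show atcg seq = atcg_alt seq
  simp only [atcg, atcg_alt]
  rw [show PySem.Dict.ofList [("A/T", (0:Int)), ("C/G", 0)] =
      PySem.Dict.mk [("A/T", 0), ("C/G", 0)] from by decide]
  rw [atcg_loop]
  have hsum := countP_not_add seq.toList (fun x => x == 'A' || x == 'T')
  have hcount := countP_or seq.toList
  have hA : ("A".toList) = ['A'] := rfl
  have hT : ("T".toList) = ['T'] := rfl
  simp only [PySem.Dict.items, PySem.Str.count_eq, PySem.Str.len, PySem.Chars.len, hA, hT,
    count_singleton, List.cons.injEq, Prod.mk.injEq, true_and, and_true]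
  constructor <;> omega
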